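-- pv_equiv track=rewrite | github.com/chanSTACK18/INVINCIX-Campus-Drive | Code Marathon/Problem Statement 2/longSequence.py | longSequence
-- ===== SOURCE A (Python) =====
-- def longSequence(list):
--
-- 	max_count = 0   		# stores maximum number of 1's (including 0)
-- 	max_index = -1  		# stores index of 0 to be replaced
--
-- 	prev_index = -1	# stores index of previous zero
-- 	count = 0   			# stores current count of zeros
--
-- 	# consider each index `i` in the list
-- 	for i in range(len(list)):
--
-- 		# if the current element is 1
-- 		if list[i] == 1:
-- 			count = count + 1
--
-- 		else:
-- 			# if the current element is 0
-- 			# reset count to 1 + number of ones to the left of current 0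
-- 			count = i - prev_index
--
-- 			# update `prev_zero_index` to the current index
-- 			prev_index = i
--
-- 		# update maximum count and index of 0 to be replaced if required
-- 		if count > max_count:
-- 			max_count = count
-- 			max_index = prev_index
--
-- 	# return index of 0 to be replaced or -1 if the list contains all 1's
-- 	return max_index
-- ===== SOURCE B (Python) =====
-- def longSequence(list):
--     n = len(list)
--     zeros = [i for i, x in enumerate(list) if x != 1]
--     best_len = 0
--     best_idx = -1
--     prev = -1
--     for z, nxt in zip(zeros, zeros[1:] + [n]):
--         run = nxt - prev - 1
--         if run > best_len:
--             best_len = run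
--             best_idx = z
--         prev = z
--     return best_idx
-- ===== Notes on version B (the rewrite author's own statement) =====
-- stated objective: alternative
-- what changed: Replaces A's single-pass running-count accumulator with a precomputed list of zero positions and a pass over adjacent zero pairs computing each flip-run as next - prev - 1.
import Mathlib
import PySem

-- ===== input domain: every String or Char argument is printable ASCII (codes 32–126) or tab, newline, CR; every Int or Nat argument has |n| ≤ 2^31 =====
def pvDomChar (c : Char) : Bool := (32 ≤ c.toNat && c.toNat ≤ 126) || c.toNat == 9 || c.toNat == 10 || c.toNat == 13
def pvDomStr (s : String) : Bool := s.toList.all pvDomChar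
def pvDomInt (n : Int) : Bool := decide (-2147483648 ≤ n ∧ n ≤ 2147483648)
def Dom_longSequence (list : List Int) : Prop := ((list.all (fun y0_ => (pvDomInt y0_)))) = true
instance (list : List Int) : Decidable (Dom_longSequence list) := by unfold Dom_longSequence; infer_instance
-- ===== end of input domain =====

-- B replaces A's single-pass running-count accumulator by a precomputed list of the
-- zero positions and a pass over adjacent zero pairs (flip-run = next - prev - 1);
-- objective: alternative (same O(n) cost, different decomposition).

-- ===== PORT A =====
-- loop 'for i in range(len(list))' with state (max_count, max_index, prev_index, count),
-- walking the list while carrying the current index i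
def longSequenceLoopA : List Int → Int → Int → Int → Int → Int → Int
  | [], _, _, mi, _, _ => mi
  | x :: xs, i, mc, mi, pidx, c =>
    let c' := if x = 1 then c + 1 else i - pidx
    let p' := if x = 1 then pidx else i
    let mc' := if c' > mc then c' else mc
    let mi' := if c' > mc then p' else mi
    longSequenceLoopA xs (i + 1) mc' mi' p' c'

def longSequence (list : List Int) : Int :=
  longSequenceLoopA list 0 0 (-1) (-1) 0

-- ===== PORT B =====
-- one fold step of Source B's 'for z, nxt in zip(zeros, zeros[1:] + [n])' loop;
-- state is (best_len, best_idx, prev)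
def longSequenceStepB : (Int × Int × Int) → (Int × Int) → (Int × Int × Int)
  | (bl, bi, prev), (z, nxt) =>
    let run := nxt - prev - 1
    if run > bl then (run, z, z) else (bl, bi, z)

def longSequence_alt (list : List Int) : Int :=
  let n : Int := list.length
  let zeros := ((PySem.List.enumerate list 0).filter (fun p => p.2 != 1)).map (·.1)
  ((zeros.zip (zeros.drop 1 ++ [n])).foldl longSequenceStepB (0, -1, -1)).2.1

-- ===== PRECONDITION & SPEC =====
def Spec_longSequence (list : List Int) (out : Int) : Prop := out = longSequence_alt list
instance (list : List Int) (out : Int) : Decidable (Spec_longSequence list out) := by unfold Spec_longSequence; infer_instance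

-- ===== CLAIM =====
def Claim_equal_longSequence : Prop := ∀ (list : List Int), Dom_longSequence list → Spec_longSequence list (longSequence list)

-- ===== LEMMAS AND PROOFS =====

-- positions (offset i) of the non-1 elements of l
def zerosIdx : List Int → Int → List Int
  | [], _ => []
  | x :: xs, i => if x = 1 then zerosIdx xs (i + 1) else i :: zerosIdx xs (i + 1)

-- block-level reformulation of A's loop: recursion over the zero positions,
-- carrying (current index i, last zero p1, count c, max mc, max-index mi)
def gA : List Int → Int → Int → Int → Int → Int → Int → Int
  | [], N, i, p1, c, mc, mi => if c + (N - i) > mc then p1 else mi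
  | z :: zs, N, i, p1, c, mc, mi =>
    let t := c + (z - i)
    let mc1 := if t > mc then t else mc
    let mi1 := if t > mc then p1 else mi
    let c2 := z - p1
    let mc2 := if c2 > mc1 then c2 else mc1
    let mi2 := if c2 > mc1 then z else mi1
    gA zs N (z + 1) z c2 mc2 mi2

-- recursive form of B's fold over zip zeros (zeros[1:] + [n])
def loopB : List Int → Int → Int → Int → Int → Int
  | [], _, _, _, bi => bi
  | z :: zs, N, prev, bl, bi =>
    let nxt := zs.headD N
    let run := nxt - prev - 1
    if run > bl then loopB zs N z run z else loopB zs N z bl bi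

lemma zerosIdx_mem_bounds : ∀ (l : List Int) (i : Int), ∀ z ∈ zerosIdx l i, i ≤ z ∧ z < i + l.length := by
  intro l
  induction l with
  | nil => intro i z hz; simp [zerosIdx] at hz
  | cons x xs ih =>
    intro i z hz
    simp only [zerosIdx] at hz
    by_cases hx : x = 1
    · simp [hx] at hz
      have := ih (i + 1) z hz
      simp only [List.length_cons]; push_cast; omega
    · simp [hx] at hz
      rcases hz with rfl | hz
      · simp only [List.length_cons]; push_cast; omega
      · have := ih (i + 1) z hz
        simp only [List.length_cons]; push_cast; omega

lemma zerosIdx_chain' : ∀ (l : List Int) (i : Int), List.IsChain (· < ·) (zerosIdx l i) := by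
  intro l
  induction l with
  | nil => intro i; simp [zerosIdx]
  | cons x xs ih =>
    intro i
    simp only [zerosIdx]
    by_cases hx : x = 1
    · simp [hx]; exact ih (i + 1)
    · simp only [hx, if_false]
      refine List.isChain_cons.mpr ⟨?_, ih (i + 1)⟩
      intro y hy
      have := zerosIdx_mem_bounds xs (i + 1) y (List.mem_of_mem_head? hy)
      omega

-- one-step shift congruence for gA after a '1' element
lemma gA_shift (zs : List Int) (N i p1 c mc mi : Int)
    (hN : i + 1 ≤ N) (hhd : ∀ z ∈ zs.head?, i + 1 ≤ z) :
    gA zs N (i + 1) p1 (c + 1) (if c + 1 > mc then c + 1 else mc) (if c + 1 > mc then p1 else mi)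
      = gA zs N i p1 c mc mi := by
  cases zs with
  | nil =>
    simp only [gA]
    split_ifs <;> omega
  | cons z zs' =>
    have hz : i + 1 ≤ z := hhd z (by simp)
    simp only [gA]
    have h1 : (if (c + 1) + (z - (i + 1)) > (if c + 1 > mc then c + 1 else mc)
        then (c + 1) + (z - (i + 1)) else (if c + 1 > mc then c + 1 else mc))
        = (if c + (z - i) > mc then c + (z - i) else mc) := by
      split_ifs <;> omega
    have h2 : (if (c + 1) + (z - (i + 1)) > (if c + 1 > mc then c + 1 else mc)
        then p1 else (if c + 1 > mc then p1 else mi))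
        = (if c + (z - i) > mc then p1 else mi) := by
      split_ifs <;> first | rfl | omega
    rw [h1, h2]

-- A's loop equals the block-level recursion over the zero positions
lemma loopA_eq_gA : ∀ (l : List Int) (i p1 c mc mi : Int), c ≤ mc →
    longSequenceLoopA l i mc mi p1 c = gA (zerosIdx l i) (i + l.length) i p1 c mc mi := by
  intro l
  induction l with
  | nil => intro i p1 c mc mi hc; simp [longSequenceLoopA, zerosIdx, gA]; omega
  | cons x xs ih =>
    intro i p1 c mc mi hc
    simp only [longSequenceLoopA, zerosIdx, List.length_cons]
    have hN : (i + (xs.length + 1 : Nat) : Int) = (i + 1) + xs.length := by push_cast; omega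
    by_cases hx : x = 1
    · simp only [hx, if_true]
      rw [ih (i + 1) p1 (c + 1) (if c + 1 > mc then c + 1 else mc) (if c + 1 > mc then p1 else mi)
            (by split_ifs <;> omega)]
      rw [hN, gA_shift]
      · omega
      · intro z hz
        exact (zerosIdx_mem_bounds xs (i + 1) z (List.mem_of_mem_head? hz)).1
    · simp only [hx, if_false]
      have hgoal : gA (i :: zerosIdx xs (i + 1)) (i + (xs.length + 1 : Nat)) i p1 c mc mi
          = gA (zerosIdx xs (i + 1)) ((i + 1) + xs.length) (i + 1) i (i - p1)
              (if i - p1 > mc then i - p1 else mc) (if i - p1 > mc then i else mi) := by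
        simp only [gA]
        have ht : ¬ (c + (i - i) > mc) := by omega
        rw [hN]
        simp only [ht, if_false]
      rw [hgoal, ← ih (i + 1) i (i - p1) _ _ (by split_ifs <;> omega)]

-- A's block recursion, started just after a zero z with previous zero p2, equals B's loop
lemma gA_eq_loopB : ∀ (zs : List Int) (N z p2 mc mi : Int),
    List.IsChain (· < ·) (z :: zs) → (∀ y ∈ zs, y < N) → z < N → p2 < z →
    gA zs N (z + 1) z (z - p2) mc mi
      = loopB zs N z (if zs.headD N - p2 - 1 > mc then zs.headD N - p2 - 1 else mc)
                     (if zs.headD N - p2 - 1 > mc then z else mi) := by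
  intro zs
  induction zs with
  | nil =>
    intro N z p2 mc mi _ _ hzN _
    simp only [gA, loopB, List.headD]
    split_ifs <;> first | rfl | omega
  | cons z' zs' ih =>
    intro N z p2 mc mi hch hyN hzN hp2
    have hzz' : z < z' := (List.isChain_cons.mp hch).1 z' (by simp)
    have hch' : List.IsChain (· < ·) (z' :: zs') := (List.isChain_cons.mp hch).2
    have hz'N : z' < N := hyN z' (by simp)
    simp only [List.headD_cons, gA]
    have ht : (z - p2) + (z' - (z + 1)) = z' - p2 - 1 := by ring
    rw [ht]
    have hmc2 : ¬ (z' - z > (if z' - p2 - 1 > mc then z' - p2 - 1 else mc)) := by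
      split_ifs <;> omega
    rw [if_neg hmc2, if_neg hmc2]
    rw [ih N z' z (if z' - p2 - 1 > mc then z' - p2 - 1 else mc)
          (if z' - p2 - 1 > mc then z else mi) hch'
          (fun y hy => hyN y (by simp [hy])) hz'N hzz']
    simp only [loopB]
    set F' := zs'.headD N - z - 1 with hF'
    set BL := (if z' - p2 - 1 > mc then z' - p2 - 1 else mc) with hBL
    set BI := (if z' - p2 - 1 > mc then z else mi) with hBI
    by_cases hb : F' > BL
    · rw [if_pos hb, if_pos hb, if_pos hb]
    · rw [if_neg hb, if_neg hb, if_neg hb]; exact congrArg (loopB zs' N z' BL) hBI.symm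

-- B's zip/fold equals the recursive loopB
lemma foldB_eq_loopB : ∀ (zs : List Int) (N bl bi prev : Int),
    ((zs.zip (zs.drop 1 ++ [N])).foldl longSequenceStepB (bl, bi, prev)).2.1
      = loopB zs N prev bl bi := by
  intro zs
  induction zs with
  | nil => intro N bl bi prev; simp [loopB]
  | cons z zs' ih =>
    intro N bl bi prev
    have hzip : (z :: zs').zip ((z :: zs').drop 1 ++ [N])
        = (z, zs'.headD N) :: zs'.zip (zs'.drop 1 ++ [N]) := by
      cases zs' <;> simp [List.zip]
    rw [hzip]
    simp only [List.foldl_cons, longSequenceStepB, loopB]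
    split_ifs with h
    · rw [ih]
    · rw [ih]

-- B's enumerate/filter/map zero-position list is zerosIdx
lemma zeros_eq_zerosIdx : ∀ (l : List Int) (s : Int),
    ((PySem.List.enumerate l s).filter (fun p => p.2 != 1)).map (·.1) = zerosIdx l s := by
  intro l
  induction l with
  | nil => intro s; simp [PySem.List.enumerate_nil, zerosIdx]
  | cons x xs ih =>
    intro s
    rw [PySem.List.enumerate_cons]
    by_cases hx : x = 1
    · simp [zerosIdx, hx, ih (s + 1)]
    · simp [zerosIdx, hx, ih (s + 1)]

-- ===== VERDICT =====
theorem longSequence_spec : Claim_equal_longSequence := by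
  unfold Claim_equal_longSequence
  intro list _
  unfold Spec_longSequence longSequence longSequence_alt
  rw [loopA_eq_gA list 0 (-1) 0 0 (-1) le_rfl]
  rw [zeros_eq_zerosIdx list 0, foldB_eq_loopB]
  have hzero : (0 : Int) + list.length = (list.length : Int) := by omega
  rw [hzero]
  cases hz : zerosIdx list 0 with
  | nil => simp [gA, loopB]
  | cons z zs =>
    have hbz : ∀ y ∈ z :: zs, 0 ≤ y ∧ y < (list.length : Int) := by
      intro y hy
      have := zerosIdx_mem_bounds list 0 y (hz ▸ hy)
      omega
    have hch : List.IsChain (· < ·) (z :: zs) := hz ▸ zerosIdx_chain' list 0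
    have hz0 : 0 ≤ z := (hbz z (by simp)).1
    have hzN : z < (list.length : Int) := (hbz z (by simp)).2
    have hhd : z + 1 ≤ zs.headD (list.length : Int) := by
      cases zs with
      | nil => simpa using hzN
      | cons z' zs' =>
        have h := (List.isChain_cons.mp hch).1 z' (by simp)
        simp only [List.headD_cons]
        omega
    -- unfold one step of gA on the initial state
    simp only [gA, loopB]
    have h1 : (if (0 : Int) + (z - 0) > 0 then (0 : Int) + (z - 0) else 0) = z := by
      split_ifs <;> omega
    have h2 : (if (0 : Int) + (z - 0) > 0 then (-1 : Int) else -1) = -1 := by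
      split_ifs <;> rfl
    rw [h1, h2]
    have hc2 : z - (-1) > z := by omega
    simp only [hc2, if_true]
    have hrw : z - (-1 : Int) = z + 1 := by ring
    rw [hrw]
    have hP := gA_eq_loopB zs (list.length : Int) z (-1) (z + 1) z hch
      (fun y hy => (hbz y (by simp [hy])).2) hzN (by omega)
    rw [show z - (-1 : Int) = z + 1 from by ring] at hP
    set F := zs.headD (list.length : Int) with hFdef
    have hrun : F - (-1) - 1 = F := by ring
    rw [hrun] at hP
    rw [hP]
    have hFpos : F > 0 := by omega
    have hF1 : (if F > z + 1 then F else z + 1) = F := by split_ifs <;> omega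
    rw [hF1, ite_self, hrun, if_pos hFpos]
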